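-- pv_equiv track=rewrite | github.com/PromyLOPh/lulua | lulua/winkbd.py | scancodeToName
-- ===== SOURCE A (Python) =====
-- def scancodeToName (m):
--     """ Create virtual scancode to name mapping tables """
--
--     ret = []
--
--     # first unprefixed keys
--     ret.extend (['/* Virtual scancode to key name */',
--             'static VSC_LPWSTR aKeyNames[] = {'])
--     f = lambda x: len (x[0]) == 1
--     for k, v in sorted (filter (f, m.items ()), key=lambda x: x[0]):
--         ret.append (f'\t{{0x{k[0]:02x}, L"{v}"}},')
--     ret.extend (['\t{0x00, NULL},', '};', ''])
--
--     ret.extend (['/* Virtual scan code (E0 prefixed) to key name */',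
--             'static VSC_LPWSTR aKeyNamesExt[] = {'])
--     f = lambda x: len (x[0]) == 2 and x[0][0] == 0xe0
--     for k, v in sorted (filter (f, m.items ()), key=lambda x: x[0]):
--         ret.append (f'\t{{0x{k[1]:02x}, L"{v}"}},')
--     ret.extend (['\t{0x00, NULL},', '};', ''])
--
--     return '\n'.join (ret)
-- ===== SOURCE B (Python) =====
-- def scancodeToName (m):
--     """ Create virtual scancode to name mapping tables """
--     base, ext = [], []
--     for k, v in sorted (m.items (), key=lambda x: x[0]):
--         if len (k) == 1:
--             base.append (f'\t{{0x{k[0]:02x}, L"{v}"}},')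
--         elif len (k) == 2 and k[0] == 0xe0:
--             ext.append (f'\t{{0x{k[1]:02x}, L"{v}"}},')
--     term = ['\t{0x00, NULL},', '};', '']
--     return '\n'.join (
--         ['/* Virtual scancode to key name */', 'static VSC_LPWSTR aKeyNames[] = {']
--         + base + term
--         + ['/* Virtual scan code (E0 prefixed) to key name */', 'static VSC_LPWSTR aKeyNamesExt[] = {']
--         + ext + term)
-- ===== Notes on version B (the rewrite author's own statement) =====
-- stated objective: alternative
-- what changed: A filters the items twice and sorts each filtered list separately; B sorts all items once and a single partitioning pass routes each entry into the base or the E0-prefixed block (correct because distinct dict keys make the sorted list strictly increasing, so filtering the sorted list equals sorting each filtered list).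
import Mathlib
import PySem

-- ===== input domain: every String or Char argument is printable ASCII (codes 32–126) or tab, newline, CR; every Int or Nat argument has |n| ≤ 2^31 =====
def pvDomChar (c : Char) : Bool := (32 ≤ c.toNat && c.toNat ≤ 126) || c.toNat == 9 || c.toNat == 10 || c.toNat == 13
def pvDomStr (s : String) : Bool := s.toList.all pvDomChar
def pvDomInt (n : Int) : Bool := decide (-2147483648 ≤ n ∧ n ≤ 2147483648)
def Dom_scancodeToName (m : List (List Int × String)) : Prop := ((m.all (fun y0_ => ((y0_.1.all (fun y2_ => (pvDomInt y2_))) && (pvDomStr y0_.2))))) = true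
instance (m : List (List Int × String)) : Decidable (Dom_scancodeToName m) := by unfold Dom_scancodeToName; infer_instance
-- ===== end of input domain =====

-- B replaces A's two filter+sort passes by ONE sort of all items followed by a single
-- partitioning fold that routes each entry into the base or the E0-prefixed group (objective: alternative).

-- shared formatting helpers (both Pythons build the identical f-string lines)
-- pyHex2 n = Python format(n, '02x'): lowercase hex, zero-padded to total width 2 (sign counts)
def pyHex2 (n : Int) : String :=
  if n < 0 then String.ofList ('-' :: Nat.toDigits 16 (-n).toNat)
  else if n < 16 then String.ofList ('0' :: Nat.toDigits 16 n.toNat)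
  else String.ofList (Nat.toDigits 16 n.toNat)

def scLine (c : Int) (v : String) : String := "\t{0x" ++ pyHex2 c ++ ", L\"" ++ v ++ "\"},"

-- ===== PORT A =====
-- A filters the dict items twice (len(k)==1; len(k)==2 and k[0]==0xe0), sorts each filtered
-- list by key, and appends the formatted lines block by block.
-- k[0] / k[1]: the filter guarantees the index is in range, so .getD 0 is exact.
def scancodeToName (m : List (List Int × String)) : String :=
  let items := (PySem.Dict.ofList m).items
  let ret : List String := ["/* Virtual scancode to key name */", "static VSC_LPWSTR aKeyNames[] = {"]
  let ret := ret ++ (PySem.List.sorted (items.filter (fun x => x.1.length == 1)) (fun x => x.1)).map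
      (fun kv => scLine ((PySem.List.pyGet? kv.1 0).getD 0) kv.2)
  let ret := ret ++ ["\t{0x00, NULL},", "};", ""]
  let ret := ret ++ ["/* Virtual scan code (E0 prefixed) to key name */", "static VSC_LPWSTR aKeyNamesExt[] = {"]
  let ret := ret ++ (PySem.List.sorted (items.filter (fun x => x.1.length == 2 && (PySem.List.pyGet? x.1 0).getD 0 == 0xe0)) (fun x => x.1)).map
      (fun kv => scLine ((PySem.List.pyGet? kv.1 1).getD 0) kv.2)
  let ret := ret ++ ["\t{0x00, NULL},", "};", ""]
  PySem.Str.join "\n" ret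

-- ===== PORT B =====
-- B sorts ALL items once, then one fold routes each entry into (base, ext).
def scancodeToName_alt (m : List (List Int × String)) : String :=
  let s := PySem.List.sorted ((PySem.Dict.ofList m).items) (fun x => x.1)
  let be := s.foldl (fun (acc : List String × List String) kv =>
      if kv.1.length == 1 then
        (acc.1 ++ [scLine ((PySem.List.pyGet? kv.1 0).getD 0) kv.2], acc.2)
      else if kv.1.length == 2 && (PySem.List.pyGet? kv.1 0).getD 0 == 0xe0 then
        (acc.1, acc.2 ++ [scLine ((PySem.List.pyGet? kv.1 1).getD 0) kv.2])
      else acc) (([], []) : List String × List String)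
  let term : List String := ["\t{0x00, NULL},", "};", ""]
  PySem.Str.join "\n"
    (["/* Virtual scancode to key name */", "static VSC_LPWSTR aKeyNames[] = {"] ++ be.1 ++ term
      ++ ["/* Virtual scan code (E0 prefixed) to key name */", "static VSC_LPWSTR aKeyNamesExt[] = {"] ++ be.2 ++ term)

-- ===== PRECONDITION & SPEC =====
def Spec_scancodeToName (m : List (List Int × String)) (out : String) : Prop := out = scancodeToName_alt m
instance (m : List (List Int × String)) (out : String) : Decidable (Spec_scancodeToName m out) := by unfold Spec_scancodeToName; infer_instance

-- ===== CLAIM (what is proved, stated in full; the proofs are below) =====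
def Claim_equal_scancodeToName : Prop := ∀ (m : List (List Int × String)), Dom_scancodeToName m → Spec_scancodeToName m (scancodeToName m)

-- ===== LEMMAS AND PROOFS =====

-- the partitioning fold of B equals two filtered map passes
theorem fold_partition (s : List (List Int × String)) (b e : List String) :
    s.foldl (fun (acc : List String × List String) kv =>
      if kv.1.length == 1 then
        (acc.1 ++ [scLine ((PySem.List.pyGet? kv.1 0).getD 0) kv.2], acc.2)
      else if kv.1.length == 2 && (PySem.List.pyGet? kv.1 0).getD 0 == 0xe0 then
        (acc.1, acc.2 ++ [scLine ((PySem.List.pyGet? kv.1 1).getD 0) kv.2])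
      else acc) (b, e)
    = (b ++ (s.filter (fun x => x.1.length == 1)).map
          (fun kv => scLine ((PySem.List.pyGet? kv.1 0).getD 0) kv.2),
       e ++ (s.filter (fun x => x.1.length == 2 && (PySem.List.pyGet? x.1 0).getD 0 == 0xe0)).map
          (fun kv => scLine ((PySem.List.pyGet? kv.1 1).getD 0) kv.2)) := by
  induction s generalizing b e with
  | nil => simp
  | cons x s ih =>
    rw [List.foldl_cons]
    by_cases h1 : (x.1.length == 1) = true
    · have h2 : (x.1.length == 2 && (PySem.List.pyGet? x.1 0).getD 0 == 0xe0) = false := by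
        have : x.1.length = 1 := by simpa using h1
        simp [this]
      rw [if_pos h1, ih]
      simp [h1, h2]
    · by_cases h2 : (x.1.length == 2 && (PySem.List.pyGet? x.1 0).getD 0 == 0xe0) = true
      · rw [if_neg (by simp [h1]), if_pos h2, ih]
        simp [h1, h2]
      · rw [if_neg (by simp [h1]), if_neg h2, ih]
        simp [h1, h2]

-- the sort in the ports, re-expressed with the LinearOrder instance (same ordering; Decidable is a subsingleton)
def sortK (xs : List (List Int × String)) : List (List Int × String) :=
  @PySem.List.sorted _ _ List.instLinearOrder.toLT LinearOrder.toDecidableLT xs (fun x => x.1) false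

theorem sorted_key_inst (xs : List (List Int × String)) :
    PySem.List.sorted xs (fun x => x.1) = sortK xs := by
  have hinst : (fun (a b : List Int) => a.decidableLT b) = (LinearOrder.toDecidableLT (α := List Int)) := by
    funext a b; exact Subsingleton.elim _ _
  unfold sortK
  rw [← hinst]

-- sorting the filtered items = filtering the sorted items (keys of a dict are distinct,
-- so the sorted item list is strictly increasing in the key and any filtered sublist too)
theorem sortK_filter_comm (m : List (List Int × String)) (p : (List Int × String) → Bool) :
    sortK (((PySem.Dict.ofList m).items).filter p)
      = (sortK ((PySem.Dict.ofList m).items)).filter p := by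
  set items := (PySem.Dict.ofList m).items with hitems
  unfold sortK
  have hperm := List.Perm.filter p (@PySem.List.sorted_perm _ _ List.instLinearOrder.toLT LinearOrder.toDecidableLT items (fun x => x.1) false)
  have hkeysnd : (items.map Prod.fst).Nodup := by
    simpa [PySem.Dict.keys, hitems] using PySem.Dict.nodup_keys_ofList m
  have hnd := hkeysnd.perm ((List.Perm.map Prod.fst (@PySem.List.sorted_perm _ _ List.instLinearOrder.toLT LinearOrder.toDecidableLT items (fun x => x.1) false)).symm)
  have hne := List.pairwise_map.mp hnd
  have hle := PySem.List.sorted_pairwise items (fun x => (x.1 : List Int))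
  have hlt := (hle.and hne).imp (fun h => lt_of_le_of_ne h.1 h.2)
  exact PySem.List.sorted_eq_of_perm_of_pairwise_lt _ _ (fun x => x.1) hperm (hlt.filter p)

-- ===== VERDICT (by name: the statement is the Claim_ definition above) =====
theorem scancodeToName_spec : Claim_equal_scancodeToName := by
  intro m _
  unfold Spec_scancodeToName scancodeToName scancodeToName_alt
  dsimp only
  rw [fold_partition]
  simp only [sorted_key_inst]
  rw [sortK_filter_comm, sortK_filter_comm]
  simp
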